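-- pv_equiv track=rewrite | github.com/lucashartmann/lllm-tui | diff_editor.py | _remove_empty_hunks
-- ===== SOURCE A (Python) =====
-- from typing import Optional, Tuple, List, Dict
--
-- def _remove_empty_hunks(lines: List[str]) -> List[str]:
--     result = []
--     i = 0
--
--     while i < len(lines):
--         if not lines[i].startswith("@@"):
--             result.append(lines[i])
--             i += 1
--             continue
--
--         hunk_start = i
--         hunk_lines = [lines[i]]
--         i += 1
--
--         has_changes = False
--         while i < len(lines) and not lines[i].startswith("@@"):
--             hunk_lines.append(lines[i])
--             if lines[i].startswith(("+", "-")) and not lines[i].startswith(("+++", "---")):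
--                 has_changes = True
--             i += 1
--
--         if has_changes:
--             result.extend(hunk_lines)
--
--     return result
-- ===== SOURCE B (Python) =====
-- def _remove_empty_hunks(lines):
--     # Single backward pass: walking from the last line, each hunk's body is seen
--     # before its "@@" header, so the keep/drop decision is made right at the header.
--     rev_out = []        # result lines, in reverse order
--     pending = []        # body of the current (partial) hunk, in reverse order
--     has_changes = False
--     for line in reversed(lines):
--         if line.startswith("@@"):
--             if has_changes:
--                 rev_out.extend(pending)
--                 rev_out.append(line)
--             pending = []
--             has_changes = False
--         else:
--             pending.append(line)
--             if line.startswith(("+", "-")) and not line.startswith(("+++", "---")):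
--                 has_changes = True
--     rev_out.extend(pending)   # lines before the first "@@" (preamble): always kept
--     return rev_out[::-1]
-- ===== Notes on version B (the rewrite author's own statement) =====
-- stated objective: alternative
-- what changed: Replaces A's forward index loop with a nested hunk-collecting inner loop by a single backward pass: scanning from the last line, each hunk's body is seen before its '@@' header, so the keep/drop decision is made at the header with no nested loop and no buffered hunk list in the forward direction; the output is built back-to-front and reversed once.
import Mathlib
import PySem

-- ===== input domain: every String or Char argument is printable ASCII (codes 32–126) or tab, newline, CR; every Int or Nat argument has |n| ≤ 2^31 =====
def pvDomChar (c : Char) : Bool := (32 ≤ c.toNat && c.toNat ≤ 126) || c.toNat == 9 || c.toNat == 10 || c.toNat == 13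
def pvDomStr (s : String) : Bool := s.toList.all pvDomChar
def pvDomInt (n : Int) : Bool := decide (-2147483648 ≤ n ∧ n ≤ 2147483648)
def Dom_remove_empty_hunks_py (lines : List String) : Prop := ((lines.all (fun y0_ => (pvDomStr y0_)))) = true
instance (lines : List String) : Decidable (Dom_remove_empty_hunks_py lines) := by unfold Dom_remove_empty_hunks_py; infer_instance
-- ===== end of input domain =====

-- B scans the lines BACKWARDS in one pass: each hunk's body is seen before its "@@"
-- header, so keep/drop is decided at the header; output is built reversed. Same O(n).

-- lines[i].startswith(("+", "-")) and not lines[i].startswith(("+++", "---"))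
def pvChg (l : String) : Bool :=
  (PySem.Str.startswith l "+" || PySem.Str.startswith l "-") &&
  !(PySem.Str.startswith l "+++" || PySem.Str.startswith l "---")

-- ===== PORT A =====
-- A's outer while / inner while, transliterated as mutual recursion on the remaining lines:
-- `remove_empty_hunks_py` is the outer loop, `pvInnerA` the inner hunk-collecting loop
-- (carrying hunk_lines and has_changes; on hitting the next "@@" control returns to the
-- outer loop, which immediately starts the next hunk).
mutual
def remove_empty_hunks_py (lines : List String) : List String :=
  match lines with
  | [] => []
  | l :: rest =>
    if PySem.Str.startswith l "@@" = false then l :: remove_empty_hunks_py rest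
    else pvInnerA [l] false rest

def pvInnerA (hunk_lines : List String) (has_changes : Bool) (lines : List String) : List String :=
  match lines with
  | [] => if has_changes then hunk_lines else []
  | l :: rest =>
    if PySem.Str.startswith l "@@" then
      (if has_changes then hunk_lines else []) ++ pvInnerA [l] false rest
    else
      pvInnerA (hunk_lines ++ [l]) (has_changes || pvChg l) rest
end

-- ===== PORT B =====
-- state (rev_out, pending, has_changes); the loop body of B's `for line in reversed(lines)`
def pvStepB (st : List String × List String × Bool) (line : String) :
    List String × List String × Bool :=
  if PySem.Str.startswith line "@@" then
    ((if st.2.2 then (st.1 ++ st.2.1) ++ [line] else st.1), [], false)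
  else
    (st.1, st.2.1 ++ [line], st.2.2 || pvChg line)

def remove_empty_hunks_py_alt (lines : List String) : List String :=
  let st := List.foldl pvStepB (([], [], false) : List String × List String × Bool) lines.reverse
  (st.1 ++ st.2.1).reverse   -- final rev_out.extend(pending); rev_out[::-1]

-- ===== PRECONDITION & SPEC =====
def Spec_remove_empty_hunks_py (lines : List String) (out : List String) : Prop := out = remove_empty_hunks_py_alt lines
instance (lines : List String) (out : List String) : Decidable (Spec_remove_empty_hunks_py lines out) := by unfold Spec_remove_empty_hunks_py; infer_instance

-- ===== CLAIM (what is proved, stated in full; the proofs are below) =====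
def Claim_equal_remove_empty_hunks_py : Prop := ∀ (lines : List String), Dom_remove_empty_hunks_py lines → Spec_remove_empty_hunks_py lines (remove_empty_hunks_py lines)

-- ===== LEMMAS AND PROOFS =====

-- B's backward fold, written as a foldr over the original line order
def pvR (lines : List String) : List String × List String × Bool :=
  List.foldr (fun l st => pvStepB st l) (([], [], false)) lines

theorem pvAlt_eq_R (lines : List String) :
    remove_empty_hunks_py_alt lines = ((pvR lines).1 ++ (pvR lines).2.1).reverse := by
  unfold remove_empty_hunks_py_alt pvR
  rw [List.foldl_reverse]

-- inner-loop invariant: pvInnerA against B's state on the remaining lines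
theorem pvInner_eq (rest : List String) (hunk : List String) (has : Bool) :
    pvInnerA hunk has rest
      = (if has || (pvR rest).2.2 then hunk ++ (pvR rest).2.1.reverse else [])
          ++ (pvR rest).1.reverse := by
  induction rest generalizing hunk has with
  | nil => cases has <;> simp [pvInnerA, pvR]
  | cons l rest ih =>
    have hstep : pvR (l :: rest) = pvStepB (pvR rest) l := rfl
    by_cases h : PySem.Str.startswith l "@@" = true
    · rw [pvInnerA, if_pos h, ih [l] false, hstep]
      unfold pvStepB
      rw [if_pos h]
      cases hh : (pvR rest).2.2 <;> cases has <;> simp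
    · simp only [Bool.not_eq_true] at h
      rw [pvInnerA, h]
      simp only [Bool.false_eq_true, if_false]
      rw [ih (hunk ++ [l]) (has || pvChg l), hstep]
      unfold pvStepB
      rw [h]
      cases has <;> cases hc : pvChg l <;> cases hh : (pvR rest).2.2 <;> simp

-- outer-loop invariant
theorem pvOuter_eq (rest : List String) :
    remove_empty_hunks_py rest = (pvR rest).2.1.reverse ++ (pvR rest).1.reverse := by
  induction rest with
  | nil => simp [remove_empty_hunks_py, pvR]
  | cons l rest ih =>
    have hstep : pvR (l :: rest) = pvStepB (pvR rest) l := rfl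
    by_cases h : PySem.Str.startswith l "@@" = true
    · rw [remove_empty_hunks_py, if_neg (by rw [h]; simp), pvInner_eq rest [l] false, hstep]
      unfold pvStepB
      rw [if_pos h]
      cases hh : (pvR rest).2.2 <;> simp
    · simp only [Bool.not_eq_true] at h
      rw [remove_empty_hunks_py, if_pos h, hstep]
      unfold pvStepB
      rw [h]
      simp only [Bool.false_eq_true, if_false]
      simp [ih]

-- ===== VERDICT (by name: the statement is the Claim_ definition above) =====
theorem remove_empty_hunks_py_spec : Claim_equal_remove_empty_hunks_py := by
  intro lines _
  unfold Spec_remove_empty_hunks_py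
  rw [pvAlt_eq_R, pvOuter_eq]
  simp
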